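-- pv_equiv track=rewrite | github.com/ravinayak/programming_practice | algo_patterns_python/sliding_window/chain_strings_dp.py | chain_strings_greedy
-- ===== SOURCE A (Python) =====
-- def chain_strings_greedy(strings):
--     """
--     Original greedy approach for comparison
--     """
--     if not strings:
--         return ''
--     used = [False] * len(strings)
--     result = [strings[0]]
--     used[0] = True
--     while True:
--         last = result[-1][-1]
--         found = False
--         for i, s in enumerate(strings):
--             if not used[i] and s[0] == last:
--                 result.append(s)
--                 used[i] = True
--                 found = True
--                 break
--         if not found:
--             break
--     return ''.join(result)
-- ===== SOURCE B (Python) =====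
-- def chain_strings_greedy(strings):
--     """
--     Bucket strings by first char (built back-to-front) and pop the next
--     candidate from the end of its bucket in O(1): one pass build + one
--     pass chain instead of rescanning all strings each step.
--     """
--     if not strings:
--         return ''
--     buckets = {}
--     for s in reversed(strings):
--         buckets.setdefault(s[0], []).append(s)
--     first = strings[0]
--     buckets[first[0]].pop()
--     out = [first]
--     last = first[-1]
--     while True:
--         b = buckets.get(last)
--         if not b:
--             break
--         s = b.pop()
--         out.append(s)
--         last = s[-1]
--     return ''.join(out)
-- ===== Notes on version B (the rewrite author's own statement) =====
-- stated objective: faster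
-- what changed: Replaced the rescan-all-strings-with-a-used-flag-array inner loop by a one-pass grouping of the strings into per-first-char buckets (built back-to-front so the next candidate is an O(1) pop from the bucket end), so each chaining step costs O(1) instead of O(n).
import Mathlib
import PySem

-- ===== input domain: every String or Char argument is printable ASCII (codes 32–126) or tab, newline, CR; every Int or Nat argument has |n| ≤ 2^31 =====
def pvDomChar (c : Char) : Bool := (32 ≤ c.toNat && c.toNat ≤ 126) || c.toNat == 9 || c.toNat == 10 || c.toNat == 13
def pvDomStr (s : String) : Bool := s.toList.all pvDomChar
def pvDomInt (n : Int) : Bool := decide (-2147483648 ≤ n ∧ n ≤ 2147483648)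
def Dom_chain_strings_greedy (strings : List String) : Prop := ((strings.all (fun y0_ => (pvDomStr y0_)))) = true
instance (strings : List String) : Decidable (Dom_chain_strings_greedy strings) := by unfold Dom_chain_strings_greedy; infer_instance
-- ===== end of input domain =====

-- B replaces A's rescan-the-whole-list-per-step greedy by per-first-char buckets
-- built back-to-front and popped from the end (objective: faster).
-- A (and B) raise IndexError on an empty string in the list; those inputs are outside Pre_.
-- Note: return-value equivalence only; neither program mutates its argument.

-- s[0] / s[-1]; exact for nonempty s (Pre_ excludes empty strings, where Python raises)
def pvHead (s : String) : Char := s.toList.headD ' '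
def pvLast (s : String) : Char := s.toList.getLastD ' '

-- ===== PORT A =====
-- the `for i, s in enumerate(strings): if not used[i] and s[0] == last: … break` scan
def chainA_find : List String → List Bool → Char → Nat → Option (Nat × String)
  | s :: ss, u :: us, last, i =>
      if !u && (pvHead s == last) then some (i, s) else chainA_find ss us last (i + 1)
  | _, _, _, _ => none

-- the `while True:` loop; each iteration marks one string used, so
-- strings.length is enough fuel for the loop to reach its `break`
def chainA_loop (strings : List String) : Nat → List Bool → List String → List String
  | 0, _, result => result
  | fuel + 1, used, result =>
    match chainA_find strings used (pvLast (result.getLastD "")) 0 with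
    | none => result
    | some (i, s) => chainA_loop strings fuel (used.set i true) (result ++ [s])

def chain_strings_greedy (strings : List String) : String :=
  match strings with
  | [] => ""
  | s0 :: _ =>
    PySem.Str.join ""
      (chainA_loop strings strings.length
        ((List.replicate strings.length false).set 0 true) [s0])

-- ===== PORT B =====
-- `for s in reversed(strings): buckets.setdefault(s[0], []).append(s)`
def chainB_build (strings : List String) : PySem.Dict Char (List String) :=
  strings.reverse.foldl (fun d s => d.modify (pvHead s) [] (fun b => b ++ [s]))
    PySem.Dict.empty

-- the `while True:` loop; each iteration pops one string, fuel strings.length suffices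
def chainB_loop : Nat → PySem.Dict Char (List String) → List String → Char → List String
  | 0, _, out, _ => out
  | fuel + 1, buckets, out, last =>
    let b := buckets.getD last []    -- buckets.get(last); `not b` covers missing and empty
    if b.isEmpty then out
    else
      let s := b.getLastD ""         -- s = b.pop()
      chainB_loop fuel (buckets.insert last b.dropLast) (out ++ [s]) (pvLast s)

def chain_strings_greedy_alt (strings : List String) : String :=
  match strings with
  | [] => ""
  | first :: _ =>
    let d0 := chainB_build strings
    let buckets := d0.insert (pvHead first) (d0.getD (pvHead first) []).dropLast
      -- buckets[first[0]].pop()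
    PySem.Str.join "" (chainB_loop strings.length buckets [first] (pvLast first))

-- ===== PRECONDITION & SPEC =====
-- Pre_ excludes exactly the inputs where Python A raises IndexError: a list containing "".
def Pre_chain_strings_greedy (strings : List String) : Prop := ∀ s ∈ strings, s ≠ ""
instance (strings : List String) : Decidable (Pre_chain_strings_greedy strings) := by
  unfold Pre_chain_strings_greedy; infer_instance

def pvWitness_chain_strings_greedy : List String := ["ab", "bc", "ca"]

def Spec_chain_strings_greedy (strings : List String) (out : String) : Prop :=
  out = chain_strings_greedy_alt strings
instance (strings : List String) (out : String) :
    Decidable (Spec_chain_strings_greedy strings out) := by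
  unfold Spec_chain_strings_greedy; infer_instance

-- ===== CLAIM =====
def Claim_equal_chain_strings_greedy : Prop :=
  ∀ (strings : List String), Dom_chain_strings_greedy strings →
    Pre_chain_strings_greedy strings →
    Spec_chain_strings_greedy strings (chain_strings_greedy strings)

-- ===== LEMMAS AND PROOFS =====

-- reference greedy on the list of still-unused strings, in original order
def chainGreedy : Nat → List String → Char → List String
  | 0, _, _ => []
  | fuel + 1, rem, last =>
    match rem.find? (fun t => pvHead t == last) with
    | none => []
    | some s => s :: chainGreedy fuel (rem.eraseP (fun t => pvHead t == last)) (pvLast s)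

-- the unused strings of A's state, in original order
def unu : List String → List Bool → List String
  | s :: ss, u :: us => if u then unu ss us else s :: unu ss us
  | _, _ => []

theorem unu_replicate_false (l : List String) : unu l (List.replicate l.length false) = l := by
  induction l with
  | nil => rfl
  | cons s ss ih => simp [unu, List.replicate, ih]

theorem chainA_find_none (ss : List String) (us : List Bool) (last : Char) (j : Nat)
    (h : chainA_find ss us last j = none) :
    (unu ss us).find? (fun t => pvHead t == last) = none := by
  induction ss generalizing us j with
  | nil => cases us <;> simp [unu]
  | cons s ss ih =>
    cases us with
    | nil => simp [unu]
    | cons u us =>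
      by_cases hu : u = true
      · subst hu
        rw [chainA_find, if_neg (by simp)] at h
        simpa [unu] using ih us (j + 1) h
      · replace hu : u = false := by simpa using hu
        subst hu
        by_cases hm : pvHead s == last
        · simp [chainA_find, hm] at h
        · rw [chainA_find, if_neg (by simp [hm])] at h
          simp [unu, hm, ih us (j + 1) h]

theorem chainA_find_some (ss : List String) (us : List Bool) (last : Char) (j i : Nat)
    (s : String) (h : chainA_find ss us last j = some (i, s)) :
    ∃ k, i = j + k ∧
      (unu ss us).find? (fun t => pvHead t == last) = some s ∧
      unu ss (us.set k true) = (unu ss us).eraseP (fun t => pvHead t == last) := by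
  induction ss generalizing us j with
  | nil => cases us <;> simp [chainA_find] at h
  | cons a ss ih =>
    cases us with
    | nil => simp [chainA_find] at h
    | cons u us =>
      by_cases hcond : (!u && (pvHead a == last)) = true
      · obtain ⟨hu, hm⟩ := by simpa using hcond
        replace hu : u = false := by simpa using hu
        subst hu
        simp only [chainA_find, if_pos hcond, Option.some.injEq, Prod.mk.injEq] at h
        obtain ⟨hi, hs⟩ := h
        refine ⟨0, by omega, ?_, ?_⟩
        · subst hs; simp [unu, hm]
        · subst hs; simp [unu, hm, List.set]
      · simp only [chainA_find, if_neg hcond] at h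
        obtain ⟨k, hk, hfind, hset⟩ := ih us (j + 1) h
        by_cases hu : u = true
        · subst hu
          exact ⟨k + 1, by omega, by simpa [unu] using hfind,
            by simpa [unu, List.set] using hset⟩
        · replace hu : u = false := by simpa using hu
          subst hu
          have hm : (pvHead a == last) = false := by
            cases hm' : (pvHead a == last) with
            | false => rfl
            | true => exact absurd (by simp [hm']) hcond
          refine ⟨k + 1, by omega, ?_, ?_⟩
          · simp [unu, hm, hfind]
          · simp [unu, List.set, hm, hset]

-- (result ++ [s]).getLastD "" = s, so the loop's `last` tracks the chosen string
theorem chainA_loop_eq (strings : List String) :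
    ∀ (fuel : Nat) (used : List Bool) (result : List String),
    chainA_loop strings fuel used result =
      result ++ chainGreedy fuel (unu strings used) (pvLast (result.getLastD "")) := by
  intro fuel
  induction fuel with
  | zero => intro used result; simp [chainA_loop, chainGreedy]
  | succ fuel ih =>
    intro used result
    simp only [chainA_loop, chainGreedy]
    cases hf : chainA_find strings used (pvLast (result.getLastD "")) 0 with
    | none =>
      rw [chainA_find_none _ _ _ _ hf]
      simp
    | some is =>
      obtain ⟨i, s⟩ := is
      obtain ⟨k, hk, hfind, hset⟩ := chainA_find_some strings used _ 0 i s hf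
      have hk0 : i = k := by omega
      subst hk0
      dsimp only
      rw [ih, hfind, hset]
      simp

theorem build_getD_aux (l : List String) :
    ∀ (d : PySem.Dict Char (List String)) (c : Char),
    (l.foldl (fun d s => d.modify (pvHead s) [] (fun b => b ++ [s])) d).getD c [] =
      d.getD c [] ++ l.filter (fun s => pvHead s == c) := by
  induction l with
  | nil => simp
  | cons s l ih =>
    intro d c
    simp only [List.foldl_cons, ih, PySem.Dict.getD_modify, List.filter_cons]
    by_cases h : c = pvHead s
    · subst h; simp
    · simp [h, beq_iff_eq, Ne.symm h]

theorem build_getD (strings : List String) (c : Char) :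
    (chainB_build strings).getD c [] =
      (strings.filter (fun s => pvHead s == c)).reverse := by
  unfold chainB_build
  rw [build_getD_aux]
  simp [List.filter_reverse]

-- removing the first p-match removes the head of the p-filter …
theorem filter_eraseP_self (p : String → Bool) (l : List String) :
    (l.eraseP p).filter p = (l.filter p).tail := by
  induction l with
  | nil => rfl
  | cons a l ih =>
    by_cases h : p a
    · simp [h]
    · simp [h, ih]

-- … and leaves every disjoint filter unchanged
theorem filter_eraseP_ne (p q : String → Bool) (hd : ∀ x, p x = true → q x = false)
    (l : List String) : (l.eraseP p).filter q = l.filter q := by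
  induction l with
  | nil => rfl
  | cons a l ih =>
    by_cases h : p a
    · simp [h, hd a h]
    · simp [h, List.filter_cons, ih]

theorem chainB_loop_eq :
    ∀ (fuel : Nat) (buckets : PySem.Dict Char (List String)) (rem out : List String)
      (last : Char),
    (∀ c, buckets.getD c [] = (rem.filter (fun t => pvHead t == c)).reverse) →
    chainB_loop fuel buckets out last = out ++ chainGreedy fuel rem last := by
  intro fuel
  induction fuel with
  | zero => intro buckets rem out last _; simp [chainB_loop, chainGreedy]
  | succ fuel ih =>
    intro buckets rem out last hInv
    have hb := hInv last
    simp only [chainB_loop, chainGreedy]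
    cases hf : rem.filter (fun t => pvHead t == last) with
    | nil =>
      have hfind : rem.find? (fun t => pvHead t == last) = none := by
        rw [List.find?_eq_none]
        intro x hx
        simpa using (List.filter_eq_nil_iff.mp hf) x hx
      rw [hfind]
      simp [hb, hf]
    | cons s t =>
      have hfind : rem.find? (fun t => pvHead t == last) = some s := by
        rw [← List.head?_filter, hf]; rfl
      have hne : (buckets.getD last []).isEmpty = false := by simp [hb, hf]
      have hgl : (buckets.getD last []).getLastD "" = s := by
        rw [hb, List.getLastD_eq_getLast?, List.getLast?_reverse, hf]; rfl
      have hdl : (buckets.getD last []).dropLast = t.reverse := by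
        rw [hb, hf]
        simpa using List.dropLast_concat (l := t.reverse)
      rw [hfind]
      dsimp only
      simp only [hne, Bool.false_eq_true, if_false, hgl, hdl]
      rw [ih (buckets.insert last t.reverse)
          (rem.eraseP (fun t => pvHead t == last)) (out ++ [s]) (pvLast s) ?_]
      · simp
      · intro c
        by_cases hc : c = last
        · subst hc
          rw [PySem.Dict.getD_insert_self, filter_eraseP_self, hf]
          rfl
        · rw [PySem.Dict.getD_insert_of_ne _ _ _ hc,
            filter_eraseP_ne _ _ (fun x hx => by
              simp only [beq_iff_eq] at hx ⊢
              simp [hx, Ne.symm hc]), hInv c]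

theorem chain_strings_greedy_spec : Claim_equal_chain_strings_greedy := by
  intro strings _ _
  unfold Spec_chain_strings_greedy
  cases strings with
  | nil => rfl
  | cons s0 rest =>
    have hA : chain_strings_greedy (s0 :: rest) =
        PySem.Str.join "" (s0 :: chainGreedy (s0 :: rest).length rest (pvLast s0)) := by
      rw [show chain_strings_greedy (s0 :: rest) =
          PySem.Str.join "" (chainA_loop (s0 :: rest) (s0 :: rest).length
            ((List.replicate (s0 :: rest).length false).set 0 true) [s0]) from rfl]
      rw [chainA_loop_eq]
      simp [List.replicate_succ, unu, unu_replicate_false]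
    have hInv0 : ∀ c,
        ((chainB_build (s0 :: rest)).insert (pvHead s0)
          ((chainB_build (s0 :: rest)).getD (pvHead s0) []).dropLast).getD c [] =
          (rest.filter (fun t => pvHead t == c)).reverse := by
      intro c
      by_cases hc : c = pvHead s0
      · subst hc
        rw [PySem.Dict.getD_insert_self, build_getD]
        simp only [List.filter_cons, beq_self_eq_true, if_true]
        rw [List.reverse_cons, List.dropLast_concat]
      · rw [PySem.Dict.getD_insert_of_ne _ _ _ hc, build_getD]
        simp [Ne.symm hc]
    have hB : chain_strings_greedy_alt (s0 :: rest) =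
        PySem.Str.join "" (s0 :: chainGreedy (s0 :: rest).length rest (pvLast s0)) := by
      rw [show chain_strings_greedy_alt (s0 :: rest) =
          PySem.Str.join "" (chainB_loop (s0 :: rest).length
            ((chainB_build (s0 :: rest)).insert (pvHead s0)
              ((chainB_build (s0 :: rest)).getD (pvHead s0) []).dropLast)
            [s0] (pvLast s0)) from rfl]
      rw [chainB_loop_eq _ _ rest _ _ hInv0]
      rfl
    rw [hA, hB]
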